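-- pv_equiv track=rewrite | github.com/emmanuel-sp/Four-Queens-Problem | 4-queens/fourq.py | solve
-- ===== SOURCE A (Python) =====
-- def solve(pos: list) -> int:
--     count = 0
--     for i in range (len(pos)):
--         l = 1
--         k = 1
--         for j in range(i + 1, len(pos)):
--             if pos[i] == pos[j]:
--                 count += 1
--             if pos[i] + k == pos[j]:
--                 count += 1
--             k += 1
--             if pos[i] - l == pos[j]:
--                 count += 1
--             l += 1
--     return count
-- ===== SOURCE B (Python) =====
-- def solve(pos: list) -> int:
--     # One pass: count, for each queen, the earlier queens on the same row,
--     # the same diagonal (key p - i) and the same anti-diagonal (key p + i).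
--     count = 0
--     rows = {}
--     diags = {}
--     antis = {}
--     for i, p in enumerate(pos):
--         count += rows.get(p, 0) + diags.get(p - i, 0) + antis.get(p + i, 0)
--         rows[p] = rows.get(p, 0) + 1
--         diags[p - i] = diags.get(p - i, 0) + 1
--         antis[p + i] = antis.get(p + i, 0) + 1
--     return count
-- ===== Notes on version B (the rewrite author's own statement) =====
-- stated objective: faster
-- what changed: Replaced the O(n^2) all-pairs double loop by a single pass that hashes each queen's row, diagonal (p-i) and anti-diagonal (p+i) into three dicts and adds the number of earlier queens sharing each key.
import Mathlib
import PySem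

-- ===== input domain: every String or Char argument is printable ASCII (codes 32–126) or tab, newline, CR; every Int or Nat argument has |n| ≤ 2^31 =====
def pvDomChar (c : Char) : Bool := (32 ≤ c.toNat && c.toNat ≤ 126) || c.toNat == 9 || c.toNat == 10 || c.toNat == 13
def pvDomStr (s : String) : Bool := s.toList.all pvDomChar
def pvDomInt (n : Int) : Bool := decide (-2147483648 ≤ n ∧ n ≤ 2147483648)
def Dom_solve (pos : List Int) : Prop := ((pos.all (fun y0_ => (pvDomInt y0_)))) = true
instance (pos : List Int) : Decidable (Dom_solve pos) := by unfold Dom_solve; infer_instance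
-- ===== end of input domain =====

-- B replaces A's O(n^2) all-pairs scan by one pass with three hash maps keyed by row, p-i and p+i.

-- ===== PORT A =====
-- inner-loop body of A: state (count, l, k), index j
def aInner (pos : List Int) (i : Int) (s : Int × Int × Int) (j : Int) : Int × Int × Int :=
  match s with
  | (count, l, k) =>
    let count := if PySem.List.pyGetD pos i 0 = PySem.List.pyGetD pos j 0 then count + 1 else count
    let count := if PySem.List.pyGetD pos i 0 + k = PySem.List.pyGetD pos j 0 then count + 1 else count
    let k := k + 1
    let count := if PySem.List.pyGetD pos i 0 - l = PySem.List.pyGetD pos j 0 then count + 1 else count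
    let l := l + 1
    (count, l, k)

def solve (pos : List Int) : Int :=
  (PySem.List.pyRange 0 (PySem.List.len pos) 1).foldl
    (fun count i =>
      ((PySem.List.pyRange (i + 1) (PySem.List.len pos) 1).foldl (aInner pos i) (count, 1, 1)).1)
    0

-- ===== PORT B =====
-- loop body of B: state (count, rows, diags, antis), element (i, p) from enumerate
def bStep (s : Int × PySem.Dict Int Int × PySem.Dict Int Int × PySem.Dict Int Int)
    (ip : Int × Int) : Int × PySem.Dict Int Int × PySem.Dict Int Int × PySem.Dict Int Int :=
  match s, ip with
  | (count, rows, diags, antis), (i, p) =>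
    (count + rows.getD p 0 + diags.getD (p - i) 0 + antis.getD (p + i) 0,
     rows.insert p (rows.getD p 0 + 1),
     diags.insert (p - i) (diags.getD (p - i) 0 + 1),
     antis.insert (p + i) (antis.getD (p + i) 0 + 1))

def solve_alt (pos : List Int) : Int :=
  ((PySem.List.enumerate pos 0).foldl bStep
    (0, PySem.Dict.empty, PySem.Dict.empty, PySem.Dict.empty)).1

-- ===== PRECONDITION & SPEC =====
def Spec_solve (pos : List Int) (out : Int) : Prop := out = solve_alt pos
instance (pos : List Int) (out : Int) : Decidable (Spec_solve pos out) := by unfold Spec_solve; infer_instance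

-- ===== CLAIM (what is proved, stated in full; the proofs are below) =====
def Claim_equal_solve : Prop := ∀ (pos : List Int), Dom_solve pos → Spec_solve pos (solve pos)

-- ===== LEMMAS AND PROOFS =====

-- the three keys of a queen list: rows are the values themselves, diagonals p-i, anti-diagonals p+i
def dKeys (xs : List Int) : List Int :=
  (PySem.List.pyRange 0 (PySem.List.len xs) 1).map (fun i => PySem.List.pyGetD xs i 0 - i)
def aKeys (xs : List Int) : List Int :=
  (PySem.List.pyRange 0 (PySem.List.len xs) 1).map (fun i => PySem.List.pyGetD xs i 0 + i)

-- increment A's inner loop adds to count at index j with offsets l, k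
def inc (pos : List Int) (i l k j : Int) : Int :=
  (if PySem.List.pyGetD pos i 0 = PySem.List.pyGetD pos j 0 then 1 else 0) +
  (if PySem.List.pyGetD pos i 0 + k = PySem.List.pyGetD pos j 0 then 1 else 0) +
  (if PySem.List.pyGetD pos i 0 - l = PySem.List.pyGetD pos j 0 then 1 else 0)

def innerSum (pos : List Int) (i l k : Int) (js : List Int) : Int :=
  match js with
  | [] => 0
  | j :: t => inc pos i l k j + innerSum pos i (l + 1) (k + 1) t

theorem aInner_eq (pos : List Int) (i c l k j : Int) :
    aInner pos i (c, l, k) j = (c + inc pos i l k j, l + 1, k + 1) := by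
  simp only [aInner, inc]
  split_ifs <;> simp <;> ring

theorem inner_char (pos : List Int) (i : Int) :
    ∀ (js : List Int) (c l k : Int),
      js.foldl (aInner pos i) (c, l, k) =
        (c + innerSum pos i l k js, l + js.length, k + js.length) := by
  intro js
  induction js with
  | nil => intro c l k; simp [innerSum]
  | cons j t ih =>
      intro c l k
      simp only [List.foldl_cons, aInner_eq, ih, innerSum, List.length_cons]
      refine Prod.ext (by ring) (Prod.ext (by push_cast; ring) (by push_cast; ring))

theorem sum_ite_count (ys : List Int) (x : Int) :
    (ys.map (fun v => if v = x then (1 : Int) else 0)).sum = ys.count x := by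
  induction ys with
  | nil => simp
  | cons y t ih =>
      simp only [List.map_cons, List.sum_cons, ih, List.count_cons]
      by_cases h : y = x
      · simp [h]
        ring
      · simp [h, beq_iff_eq]

theorem solve_eq_sum (pos : List Int) :
    solve pos = ((PySem.List.pyRange 0 (PySem.List.len pos) 1).map
      (fun i => innerSum pos i 1 1 (PySem.List.pyRange (i + 1) (PySem.List.len pos) 1))).sum := by
  unfold solve
  have hf : (fun (count i : Int) =>
      ((PySem.List.pyRange (i + 1) (PySem.List.len pos) 1).foldl (aInner pos i) (count, 1, 1)).1)
      = fun count i => count + innerSum pos i 1 1 (PySem.List.pyRange (i + 1) (PySem.List.len pos) 1) := by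
    funext c i
    rw [inner_char]
  rw [hf, PySem.List.foldl_add]
  ring

theorem pyGetD_append_lt (xs : List Int) (x j : Int) (h0 : 0 ≤ j) (h1 : j < xs.length) :
    PySem.List.pyGetD (xs ++ [x]) j 0 = PySem.List.pyGetD xs j 0 := by
  rw [PySem.List.pyGetD_eq_getElem (xs ++ [x]) 0 h0 (by simp; omega),
      PySem.List.pyGetD_eq_getElem xs 0 h0 h1,
      List.getElem_append_left (by omega)]

theorem pyGetD_append_len (xs : List Int) (x : Int) :
    PySem.List.pyGetD (xs ++ [x]) (xs.length : Int) 0 = x := by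
  rw [PySem.List.pyGetD_eq_getElem (xs ++ [x]) 0 (by positivity) (by simp)]
  simp

theorem dKeys_snoc (xs : List Int) (x : Int) :
    dKeys (xs ++ [x]) = dKeys xs ++ [x - xs.length] := by
  unfold dKeys
  rw [PySem.List.len_eq, PySem.List.len_eq]
  have h : ((xs ++ [x]).length : Int) = (xs.length : Int) + 1 := by simp
  rw [h, PySem.List.pyRange_one_succ_right (by positivity), List.map_append]
  congr 1
  · apply List.map_congr_left
    intro i hi
    rw [PySem.List.mem_pyRange_one] at hi
    rw [pyGetD_append_lt xs x i hi.1 hi.2]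
  · simp

theorem aKeys_snoc (xs : List Int) (x : Int) :
    aKeys (xs ++ [x]) = aKeys xs ++ [x + xs.length] := by
  unfold aKeys
  rw [PySem.List.len_eq, PySem.List.len_eq]
  have h : ((xs ++ [x]).length : Int) = (xs.length : Int) + 1 := by simp
  rw [h, PySem.List.pyRange_one_succ_right (by positivity), List.map_append]
  congr 1
  · apply List.map_congr_left
    intro i hi
    rw [PySem.List.mem_pyRange_one] at hi
    rw [pyGetD_append_lt xs x i hi.1 hi.2]
  · simp

theorem innerSum_snoc (pos : List Int) (i j : Int) :
    ∀ (js : List Int) (l k : Int),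
      innerSum pos i l k (js ++ [j]) =
        innerSum pos i l k js + inc pos i (l + js.length) (k + js.length) j := by
  intro js
  induction js with
  | nil => intro l k; simp [innerSum]
  | cons j' t ih =>
      intro l k
      simp only [List.cons_append, innerSum, ih, List.length_cons]
      push_cast
      ring_nf

theorem innerSum_congr (xs : List Int) (x i : Int) (h0 : 0 ≤ i) (h1 : i < xs.length) :
    ∀ (js : List Int), (∀ j ∈ js, 0 ≤ j ∧ j < xs.length) →
      ∀ l k, innerSum (xs ++ [x]) i l k js = innerSum xs i l k js := by
  intro js
  induction js with
  | nil => intro _ l k; simp [innerSum]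
  | cons j t ih =>
      intro hmem l k
      have hj := hmem j (by simp)
      simp only [innerSum, inc,
        pyGetD_append_lt xs x i h0 h1, pyGetD_append_lt xs x j hj.1 hj.2,
        ih (fun j hjt => hmem j (List.mem_cons_of_mem _ hjt))]

theorem A_snoc (xs : List Int) (x : Int) :
    solve (xs ++ [x]) =
      solve xs + xs.count x + (dKeys xs).count (x - xs.length)
        + (aKeys xs).count (x + xs.length) := by
  rw [solve_eq_sum, solve_eq_sum]
  have hlen : PySem.List.len (xs ++ [x]) = (xs.length : Int) + 1 := by
    simp [PySem.List.len_eq]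
  rw [hlen, PySem.List.len_eq]
  rw [PySem.List.pyRange_one_succ_right (by positivity), List.map_append, List.sum_append]
  have hlast : (List.map (fun i => innerSum (xs ++ [x]) i 1 1
      (PySem.List.pyRange (i + 1) ((xs.length : Int) + 1) 1)) [(xs.length : Int)]).sum = 0 := by
    simp only [List.map_cons, List.map_nil, List.sum_cons, List.sum_nil]
    rw [PySem.List.pyRange_one_eq_nil le_rfl]
    rfl
  have hmap : (PySem.List.pyRange 0 (xs.length : Int) 1).map
      (fun i => innerSum (xs ++ [x]) i 1 1 (PySem.List.pyRange (i + 1) ((xs.length : Int) + 1) 1))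
      = (PySem.List.pyRange 0 (xs.length : Int) 1).map
      (fun i => innerSum xs i 1 1 (PySem.List.pyRange (i + 1) (xs.length : Int) 1)
        + ((if PySem.List.pyGetD xs i 0 = x then (1 : Int) else 0)
          + (if PySem.List.pyGetD xs i 0 - i = x - (xs.length : Int) then (1 : Int) else 0)
          + (if PySem.List.pyGetD xs i 0 + i = x + (xs.length : Int) then (1 : Int) else 0))) := by
    apply List.map_congr_left
    intro i hi
    rw [PySem.List.mem_pyRange_one] at hi
    rw [PySem.List.pyRange_one_succ_right (by omega), innerSum_snoc,
        innerSum_congr xs x i hi.1 hi.2 _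
          (fun j hj => by rw [PySem.List.mem_pyRange_one] at hj; exact ⟨by omega, by omega⟩)]
    congr 1
    have hlk : (1 : Int) + ((PySem.List.pyRange (i + 1) (xs.length : Int) 1).length : Int)
        = (xs.length : Int) - i := by
      rw [PySem.List.length_pyRange_one]; omega
    rw [hlk]
    unfold inc
    rw [pyGetD_append_lt xs x i hi.1 hi.2, pyGetD_append_len]
    have e2 : (if PySem.List.pyGetD xs i 0 + ((xs.length : Int) - i) = x then (1 : Int) else 0)
        = (if PySem.List.pyGetD xs i 0 - i = x - (xs.length : Int) then (1 : Int) else 0) := by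
      by_cases h : PySem.List.pyGetD xs i 0 - i = x - (xs.length : Int)
      · rw [if_pos (by omega), if_pos h]
      · rw [if_neg (by omega), if_neg h]
    have e3 : (if PySem.List.pyGetD xs i 0 - ((xs.length : Int) - i) = x then (1 : Int) else 0)
        = (if PySem.List.pyGetD xs i 0 + i = x + (xs.length : Int) then (1 : Int) else 0) := by
      by_cases h : PySem.List.pyGetD xs i 0 + i = x + (xs.length : Int)
      · rw [if_pos (by omega), if_pos h]
      · rw [if_neg (by omega), if_neg h]
    rw [e2, e3]
  rw [hmap, hlast, PySem.List.sum_map_add_int, PySem.List.sum_map_add_int,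
      PySem.List.sum_map_add_int]
  have h1 : ((PySem.List.pyRange 0 (xs.length : Int) 1).map
      (fun i => if PySem.List.pyGetD xs i 0 = x then (1 : Int) else 0)).sum = xs.count x := by
    have : (PySem.List.pyRange 0 (xs.length : Int) 1).map
        (fun i => if PySem.List.pyGetD xs i 0 = x then (1 : Int) else 0)
        = ((PySem.List.pyRange 0 (xs.length : Int) 1).map
            (fun i => PySem.List.pyGetD xs i 0)).map (fun v => if v = x then (1 : Int) else 0) := by
      rw [List.map_map]; rfl
    rw [this, PySem.List.map_pyGetD_pyRange_zero', sum_ite_count]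
  have h2 : ((PySem.List.pyRange 0 (xs.length : Int) 1).map
      (fun i => if PySem.List.pyGetD xs i 0 - i = x - (xs.length : Int) then (1 : Int) else 0)).sum
      = (dKeys xs).count (x - (xs.length : Int)) := by
    have : (PySem.List.pyRange 0 (xs.length : Int) 1).map
        (fun i => if PySem.List.pyGetD xs i 0 - i = x - (xs.length : Int) then (1 : Int) else 0)
        = (dKeys xs).map (fun v => if v = x - (xs.length : Int) then (1 : Int) else 0) := by
      unfold dKeys
      rw [PySem.List.len_eq, List.map_map]; rfl
    rw [this, sum_ite_count]
  have h3 : ((PySem.List.pyRange 0 (xs.length : Int) 1).map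
      (fun i => if PySem.List.pyGetD xs i 0 + i = x + (xs.length : Int) then (1 : Int) else 0)).sum
      = (aKeys xs).count (x + (xs.length : Int)) := by
    have : (PySem.List.pyRange 0 (xs.length : Int) 1).map
        (fun i => if PySem.List.pyGetD xs i 0 + i = x + (xs.length : Int) then (1 : Int) else 0)
        = (aKeys xs).map (fun v => if v = x + (xs.length : Int) then (1 : Int) else 0) := by
      unfold aKeys
      rw [PySem.List.len_eq, List.map_map]; rfl
    rw [this, sum_ite_count]
  rw [h1, h2, h3]
  ring

theorem B_state (xs : List Int) :
    ∀ v : Int,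
      (((PySem.List.enumerate xs 0).foldl bStep
         (0, PySem.Dict.empty, PySem.Dict.empty, PySem.Dict.empty)).2.1.getD v 0 = xs.count v)
      ∧ (((PySem.List.enumerate xs 0).foldl bStep
         (0, PySem.Dict.empty, PySem.Dict.empty, PySem.Dict.empty)).2.2.1.getD v 0 = (dKeys xs).count v)
      ∧ (((PySem.List.enumerate xs 0).foldl bStep
         (0, PySem.Dict.empty, PySem.Dict.empty, PySem.Dict.empty)).2.2.2.getD v 0 = (aKeys xs).count v) := by
  induction xs using List.reverseRecOn with
  | nil =>
      intro v
      refine ⟨?_, ?_, ?_⟩ <;>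
        simp [PySem.List.enumerate, dKeys, aKeys, PySem.List.len_eq,
          PySem.List.pyRange_one_eq_nil, PySem.Dict.getD, PySem.Dict.get?, PySem.Dict.empty]
  | append_singleton xs x ih =>
      intro v
      have hen : PySem.List.enumerate (xs ++ [x]) 0
          = PySem.List.enumerate xs 0 ++ [((xs.length : Int), x)] := by
        rw [PySem.List.enumerate_append]
        simp [PySem.List.enumerate]
      rw [hen, List.foldl_append]
      obtain ⟨hr, hd, ha⟩ := ih v
      rcases hst : ((PySem.List.enumerate xs 0).foldl bStep
          (0, PySem.Dict.empty, PySem.Dict.empty, PySem.Dict.empty)) with ⟨c, r, dd, aa⟩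
      rw [hst] at hr hd ha
      obtain ⟨hrx, hdx, hax⟩ := ih x
      rw [hst] at hrx hdx hax
      refine ⟨?_, ?_, ?_⟩
      · show (r.insert x (r.getD x 0 + 1)).getD v 0 = _
        rw [PySem.Dict.getD_insert, List.count_append]
        by_cases h : v = x
        · rw [if_pos h, hrx, h]
          simp
        · rw [if_neg h, hr]
          simp [List.count_singleton]
          omega
      · show (dd.insert (x - (xs.length : Int)) (dd.getD (x - (xs.length : Int)) 0 + 1)).getD v 0 = _
        rw [PySem.Dict.getD_insert, dKeys_snoc, List.count_append]
        obtain ⟨_, hdx2, _⟩ := ih (x - (xs.length : Int))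
        rw [hst] at hdx2
        by_cases h : v = x - (xs.length : Int)
        · rw [if_pos h, hdx2, h]
          simp
        · rw [if_neg h, hd]
          simp [List.count_singleton]
          omega
      · show (aa.insert (x + (xs.length : Int)) (aa.getD (x + (xs.length : Int)) 0 + 1)).getD v 0 = _
        rw [PySem.Dict.getD_insert, aKeys_snoc, List.count_append]
        obtain ⟨_, _, hax2⟩ := ih (x + (xs.length : Int))
        rw [hst] at hax2
        by_cases h : v = x + (xs.length : Int)
        · rw [if_pos h, hax2, h]
          simp
        · rw [if_neg h, ha]
          simp [List.count_singleton]
          omega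

theorem B_snoc (xs : List Int) (x : Int) :
    solve_alt (xs ++ [x]) =
      solve_alt xs + xs.count x + (dKeys xs).count (x - xs.length)
        + (aKeys xs).count (x + xs.length) := by
  unfold solve_alt
  have hen : PySem.List.enumerate (xs ++ [x]) 0
      = PySem.List.enumerate xs 0 ++ [((xs.length : Int), x)] := by
    rw [PySem.List.enumerate_append]
    simp [PySem.List.enumerate]
  rw [hen, List.foldl_append]
  obtain ⟨hr, _, _⟩ := B_state xs x
  obtain ⟨_, hd, _⟩ := B_state xs (x - (xs.length : Int))
  obtain ⟨_, _, ha⟩ := B_state xs (x + (xs.length : Int))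
  rcases hst : ((PySem.List.enumerate xs 0).foldl bStep
      (0, PySem.Dict.empty, PySem.Dict.empty, PySem.Dict.empty)) with ⟨c, r, dd, aa⟩
  rw [hst] at hr hd ha
  show (bStep (c, r, dd, aa) ((xs.length : Int), x)).1 = _
  show c + r.getD x 0 + dd.getD (x - (xs.length : Int)) 0 + aa.getD (x + (xs.length : Int)) 0 = _
  rw [hr, hd, ha]

theorem solve_eq_alt (pos : List Int) : solve pos = solve_alt pos := by
  induction pos using List.reverseRecOn with
  | nil => rfl
  | append_singleton xs x ih => rw [A_snoc, B_snoc, ih]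

-- ===== VERDICT (by name: the statement is the Claim_ definition above) =====
theorem solve_spec : Claim_equal_solve := by
  unfold Claim_equal_solve
  intro pos _
  exact solve_eq_alt pos
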